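-- pv_equiv track=rewrite | github.com/vedantmane12/agentic-systems | backend/features/agents/coordinator.py | _prioritize_tasks
-- ===== SOURCE A (Python) =====
-- from typing import Optional, Dict, Any, List
--
-- def _prioritize_tasks(sub_tasks: List[Dict[str, Any]]) -> List[str]:
--     """Determine task execution order"""
--     # Simple priority: gathering -> analysis -> synthesis
--     priority_order = []
--
--     # First: all gathering tasks
--     for task in sub_tasks:
--         if task['type'] == 'information_gathering':
--             priority_order.append(task['id'])
--
--     # Second: all analysis tasks
--     for task in sub_tasks:
--         if task['type'] == 'analysis':
--             priority_order.append(task['id'])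
--
--     # Last: synthesis tasks
--     for task in sub_tasks:
--         if task['type'] == 'synthesis':
--             priority_order.append(task['id'])
--
--     return priority_order
-- ===== SOURCE B (Python) =====
-- def _prioritize_tasks(sub_tasks):
--     """Determine task execution order: one pass into three buckets, then concatenate."""
--     buckets = {'information_gathering': [], 'analysis': [], 'synthesis': []}
--     for task in sub_tasks:
--         bucket = buckets.get(task['type'])
--         if bucket is not None:
--             bucket.append(task['id'])
--     return (buckets['information_gathering'] + buckets['analysis']
--             + buckets['synthesis'])
-- ===== Notes on version B (the rewrite author's own statement) =====
-- stated objective: alternative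
-- what changed: Replaces A's three full scans of sub_tasks (one per type) with a single pass that drops each task id into one of three type buckets and concatenates the buckets at the end.
import Mathlib
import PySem

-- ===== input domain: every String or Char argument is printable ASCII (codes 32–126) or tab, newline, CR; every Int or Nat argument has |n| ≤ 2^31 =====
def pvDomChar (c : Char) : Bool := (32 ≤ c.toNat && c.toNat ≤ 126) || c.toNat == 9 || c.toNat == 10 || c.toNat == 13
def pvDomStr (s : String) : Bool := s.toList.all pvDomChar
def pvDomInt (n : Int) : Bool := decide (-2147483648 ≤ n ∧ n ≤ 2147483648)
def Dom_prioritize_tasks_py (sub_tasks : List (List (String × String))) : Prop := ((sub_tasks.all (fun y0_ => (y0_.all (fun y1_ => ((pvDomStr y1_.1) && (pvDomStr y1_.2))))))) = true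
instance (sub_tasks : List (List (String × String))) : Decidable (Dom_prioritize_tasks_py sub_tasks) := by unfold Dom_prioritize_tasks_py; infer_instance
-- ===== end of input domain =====

-- B = one pass into three type buckets, then concatenation, instead of A's three scans; return values only.
-- Python dict lookup task[k] (first match in the association list; raises KeyError when missing — excluded by Pre_).
def pvLookup (t : List (String × String)) (k : String) : Option String :=
  (PySem.Dict.mk t).get? k

-- ===== PORT A =====
-- A: three separate scans over sub_tasks, appending matching ids to one growing list.
def prioritize_tasks_py (sub_tasks : List (List (String × String))) : List String :=
  let p1 := sub_tasks.foldl (fun acc t =>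
    if (pvLookup t "type").getD "" = "information_gathering" then acc ++ [(pvLookup t "id").getD ""] else acc) []
  let p2 := sub_tasks.foldl (fun acc t =>
    if (pvLookup t "type").getD "" = "analysis" then acc ++ [(pvLookup t "id").getD ""] else acc) p1
  sub_tasks.foldl (fun acc t =>
    if (pvLookup t "type").getD "" = "synthesis" then acc ++ [(pvLookup t "id").getD ""] else acc) p2

-- ===== PORT B =====
-- B: single pass maintaining three buckets (g, a, s); unknown types are skipped.
def prioritize_tasks_py_alt (sub_tasks : List (List (String × String))) : List String :=
  let bks := sub_tasks.foldl (fun (bks : List String × List String × List String) t =>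
    match (pvLookup t "type").getD "" with
    | "information_gathering" => (bks.1 ++ [(pvLookup t "id").getD ""], bks.2.1, bks.2.2)
    | "analysis" => (bks.1, bks.2.1 ++ [(pvLookup t "id").getD ""], bks.2.2)
    | "synthesis" => (bks.1, bks.2.1, bks.2.2 ++ [(pvLookup t "id").getD ""])
    | _ => bks) ([], [], [])
  bks.1 ++ bks.2.1 ++ bks.2.2

-- ===== PRECONDITION & SPEC =====
-- Pre_ excludes exactly the inputs where A raises KeyError: a task without a 'type' key,
-- or a task of one of the three prioritized types without an 'id' key.
def Pre_prioritize_tasks_py (sub_tasks : List (List (String × String))) : Prop :=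
  ∀ t ∈ sub_tasks, (pvLookup t "type").isSome = true ∧
    ((pvLookup t "type" = some "information_gathering" ∨ pvLookup t "type" = some "analysis" ∨
      pvLookup t "type" = some "synthesis") → (pvLookup t "id").isSome = true)
instance (sub_tasks : List (List (String × String))) : Decidable (Pre_prioritize_tasks_py sub_tasks) := by
  unfold Pre_prioritize_tasks_py; infer_instance

def pvWitness_prioritize_tasks_py : (List (List (String × String))) :=
  [[("type", "analysis"), ("id", "t2")], [("type", "other")],
   [("type", "information_gathering"), ("id", "t1")]]

def Spec_prioritize_tasks_py (sub_tasks : List (List (String × String))) (out : List String) : Prop := out = prioritize_tasks_py_alt sub_tasks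
instance (sub_tasks : List (List (String × String))) (out : List String) : Decidable (Spec_prioritize_tasks_py sub_tasks out) := by unfold Spec_prioritize_tasks_py; infer_instance

-- ===== CLAIM (what is proved, stated in full; the proofs are below) =====
def Claim_equal_prioritize_tasks_py : Prop := ∀ (sub_tasks : List (List (String × String))), Dom_prioritize_tasks_py sub_tasks → Pre_prioritize_tasks_py sub_tasks → Spec_prioritize_tasks_py sub_tasks (prioritize_tasks_py sub_tasks)

-- ===== LEMMAS AND PROOFS =====

-- B's fold, started from arbitrary buckets, appends the per-type selections.
theorem alt_foldl_eq (sub_tasks : List (List (String × String)))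
    (g a s : List String) :
    sub_tasks.foldl (fun (bks : List String × List String × List String) t =>
      match (pvLookup t "type").getD "" with
      | "information_gathering" => (bks.1 ++ [(pvLookup t "id").getD ""], bks.2.1, bks.2.2)
      | "analysis" => (bks.1, bks.2.1 ++ [(pvLookup t "id").getD ""], bks.2.2)
      | "synthesis" => (bks.1, bks.2.1, bks.2.2 ++ [(pvLookup t "id").getD ""])
      | _ => bks) (g, a, s)
    = (g ++ (sub_tasks.filter (fun t => (pvLookup t "type").getD "" == "information_gathering")).map (fun t => (pvLookup t "id").getD ""),
       a ++ (sub_tasks.filter (fun t => (pvLookup t "type").getD "" == "analysis")).map (fun t => (pvLookup t "id").getD ""),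
       s ++ (sub_tasks.filter (fun t => (pvLookup t "type").getD "" == "synthesis")).map (fun t => (pvLookup t "id").getD "")) := by
  induction sub_tasks generalizing g a s with
  | nil => simp
  | cons t ts ih =>
    simp only [List.foldl_cons, List.filter_cons]
    by_cases h1 : (pvLookup t "type").getD "" = "information_gathering"
    · simp [h1, ih]
    · by_cases h2 : (pvLookup t "type").getD "" = "analysis"
      · simp [h2, ih]
      · by_cases h3 : (pvLookup t "type").getD "" = "synthesis"
        · simp [h3, ih]
        · have hm : (match (pvLookup t "type").getD "" with
            | "information_gathering" => ((g ++ [(pvLookup t "id").getD ""], a, s) : List String × List String × List String)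
            | "analysis" => (g, a ++ [(pvLookup t "id").getD ""], s)
            | "synthesis" => (g, a, s ++ [(pvLookup t "id").getD ""])
            | _ => (g, a, s)) = (g, a, s) := by
            split <;> simp_all
          rw [hm, ih]
          simp [h1, h2, h3]

-- Each of A's scans, specialised to our per-task lookups (cites the library loop-shape lemma).
theorem scan_eq (l : List (List (String × String))) (acc : List String) (ty : String) :
    l.foldl (fun acc t => if (pvLookup t "type").getD "" = ty then acc ++ [(pvLookup t "id").getD ""] else acc) acc
    = acc ++ (l.filter (fun t => (pvLookup t "type").getD "" == ty)).map (fun t => (pvLookup t "id").getD "") := by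
  simpa using PySem.List.foldl_append_if (fun t => (pvLookup t "type").getD "" == ty)
    (fun t => (pvLookup t "id").getD "") l acc

-- ===== VERDICT (by name: the statement is the Claim_ definition above) =====
theorem prioritize_tasks_py_spec : Claim_equal_prioritize_tasks_py := by
  intro sub_tasks _ _
  unfold Spec_prioritize_tasks_py prioritize_tasks_py prioritize_tasks_py_alt
  simp only [alt_foldl_eq, scan_eq, List.nil_append, List.append_assoc]
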